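-- pv_equiv track=rewrite | github.com/friargregarious/Advent-of-Code | src/AOC 2016/Day 04/Solve2016_04b.py | is_a_room
-- ===== SOURCE A (Python) =====
-- from string import ascii_letters, ascii_lowercase
--
-- def is_a_room(left, right):
--     counts = {}
--     new_counts = {}
--
--     for c in left:
--         if c in ascii_letters:
--             if c in counts:
--                 counts[c] += 1
--             else:
--                 counts[c] = 1
--
--     for k, v in counts.items():
--         if v in new_counts:
--             new_counts[v] += k
--         else:
--             new_counts[v] = k
--
--     new_counts = {k : "".join(sorted(v)) for k, v in new_counts.items()}
--     key = sorted(set(counts.values()), reverse=True)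
--
--     new_counts = {k: new_counts[k] for k in key}
--
--     new_order = ""
--     for k, v in new_counts.items():
--         new_order += v
--
--     new_order = new_order[:5]
--
--     return new_order==right
-- ===== SOURCE B (Python) =====
-- from string import ascii_letters
--
-- def is_a_room(left, right):
--     counts = {}
--     for c in left:
--         if c in ascii_letters:
--             counts[c] = counts.get(c, 0) + 1
--     order = "".join(sorted(counts, key=lambda c: (-counts[c], c)))
--     return order[:5] == right
-- ===== Notes on version B (the rewrite author's own statement) =====
-- stated objective: idiomatic
-- what changed: Replaces A's four-stage pipeline (count dict, invert into count->letters dict, per-bucket sort, order buckets by descending count and concatenate) with one Counter-style count plus a single sort of the distinct letters by the composite key (-count, letter).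
import Mathlib
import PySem

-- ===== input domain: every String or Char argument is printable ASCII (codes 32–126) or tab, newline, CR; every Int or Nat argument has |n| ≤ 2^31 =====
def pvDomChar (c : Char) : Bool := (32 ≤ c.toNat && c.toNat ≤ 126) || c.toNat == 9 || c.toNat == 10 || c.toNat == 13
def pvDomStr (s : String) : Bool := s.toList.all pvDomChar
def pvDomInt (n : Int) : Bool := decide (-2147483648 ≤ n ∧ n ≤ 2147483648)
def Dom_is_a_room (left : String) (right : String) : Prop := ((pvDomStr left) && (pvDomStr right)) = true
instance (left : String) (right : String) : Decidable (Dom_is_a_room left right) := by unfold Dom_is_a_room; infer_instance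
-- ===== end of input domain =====

-- B replaces A's bucket-by-count pipeline with one count pass and a single sort by the key (-count, letter); objective: idiomatic.

-- ===== PORT A =====
-- string.ascii_letters
def pyAsciiLetters : List Char := "abcdefghijklmnopqrstuvwxyzABCDEFGHIJKLMNOPQRSTUVWXYZ".toList

def is_a_room (left : String) (right : String) : Bool :=
  -- for c in left: if c in ascii_letters: counts[c] += 1 / = 1
  let counts : PySem.Dict Char Int :=
    left.toList.foldl (fun d c =>
      if pyAsciiLetters.contains c then
        if d.contains c then d.modify c 0 (· + 1) else d.insert c 1
      else d) PySem.Dict.empty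
  -- for k, v in counts.items(): new_counts[v] += k / = k   (strings as List Char)
  let newCounts : PySem.Dict Int (List Char) :=
    counts.items.foldl (fun d kv =>
      if d.contains kv.2 then d.modify kv.2 [] (· ++ [kv.1]) else d.insert kv.2 [kv.1])
      PySem.Dict.empty
  -- new_counts = {k : "".join(sorted(v)) for k, v in new_counts.items()}
  let newCounts2 : PySem.Dict Int (List Char) :=
    newCounts.items.foldl (fun d kv => d.insert kv.1 (PySem.List.sorted kv.2 (fun x => x) false))
      PySem.Dict.empty
  -- key = sorted(set(counts.values()), reverse=True)
  let key : List Int := PySem.List.sorted (PySem.Set.ofList counts.values) (fun x => x) true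
  -- new_counts = {k: new_counts[k] for k in key}   (every k in key is a key of new_counts,
  -- so Python's new_counts[k] never raises; ported as getD with an unreachable default)
  let newCounts3 : PySem.Dict Int (List Char) :=
    key.foldl (fun d k => d.insert k (newCounts2.getD k [])) PySem.Dict.empty
  -- new_order = ""; for k, v in …: new_order += v
  let newOrder : List Char :=
    newCounts3.items.foldl (fun acc kv => acc ++ kv.2) []
  -- new_order = new_order[:5]; return new_order == right
  (PySem.List.slice newOrder none (some 5)) == right.toList

-- ===== PORT B =====
def is_a_room_alt (left : String) (right : String) : Bool :=
  -- counts[c] = counts.get(c, 0) + 1 for the letters of left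
  let counts : PySem.Dict Char Int :=
    left.toList.foldl (fun d c =>
      if pyAsciiLetters.contains c then d.insert c (d.getD c 0 + 1) else d) PySem.Dict.empty
  -- order = "".join(sorted(counts, key=lambda c: (-counts[c], c)))
  let order : List Char :=
    PySem.List.sorted2 counts.keys (fun c => -(counts.getD c 0)) (fun c => c) false
  -- return order[:5] == right
  (PySem.List.slice order none (some 5)) == right.toList

-- ===== PRECONDITION & SPEC =====
def Spec_is_a_room (left : String) (right : String) (out : Bool) : Prop := out = is_a_room_alt left right
instance (left : String) (right : String) (out : Bool) : Decidable (Spec_is_a_room left right out) := by unfold Spec_is_a_room; infer_instance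

-- ===== CLAIM (what is proved, stated in full; the proofs are below) =====
def Claim_equal_is_a_room : Prop := ∀ (left : String) (right : String), Dom_is_a_room left right → Spec_is_a_room left right (is_a_room left right)

-- ===== LEMMAS AND PROOFS =====

lemma pv_modify_eq_insert {κ : Type} [BEq κ] [LawfulBEq κ] {ν : Type}
    (d : PySem.Dict κ ν) (k : κ) (d0 : ν) (f : ν → ν) :
    d.modify k d0 f = d.insert k (f (d.getD k d0)) := rfl

lemma pv_countsA (left : String) :
    left.toList.foldl (fun d c =>
      if pyAsciiLetters.contains c then
        if d.contains c then d.modify c 0 (· + 1) else d.insert c 1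
      else d) PySem.Dict.empty
    = PySem.Dict.counter (left.toList.filter (fun c => pyAsciiLetters.contains c)) := by
  have h : (fun (d : PySem.Dict Char Int) c =>
      if pyAsciiLetters.contains c then
        if d.contains c then d.modify c 0 (· + 1) else d.insert c 1
      else d)
      = (fun d c => if pyAsciiLetters.contains c then d.modify c 0 (· + 1) else d) := by
    funext d c
    by_cases hc : d.contains c = true <;>
      simp [hc, pv_modify_eq_insert, PySem.Dict.getD_of_not_contains]
  rw [h, PySem.List.foldl_if_eq_foldl_filter, PySem.Dict.counter]

lemma pv_countsB (left : String) :
    left.toList.foldl (fun d c =>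
      if pyAsciiLetters.contains c then d.insert c (d.getD c 0 + 1) else d) PySem.Dict.empty
    = PySem.Dict.counter (left.toList.filter (fun c => pyAsciiLetters.contains c)) := by
  rw [PySem.List.foldl_if_eq_foldl_filter, PySem.Dict.foldl_insert_getD_add_one_eq_counter]


lemma pv_sorted2_eq_sorted_lex (xs : List Char) (k1 : Char → Int) :
    PySem.List.sorted2 xs k1 (fun c => c) false
      = PySem.List.sorted xs (fun c => toLex ((k1 c, c) : Int × Char)) false := by
  have h : (fun a b => decide (k1 a < k1 b) || (!decide (k1 b < k1 a) && decide (a < b)))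
      = (fun a b => decide (toLex ((k1 a, a) : Int × Char) < toLex ((k1 b, b) : Int × Char))) := by
    funext a b
    rcases lt_trichotomy (k1 a) (k1 b) with h1 | h1 | h1 <;>
      simp [Prod.Lex.toLex_lt_toLex, h1, not_lt_of_gt, ne_of_lt]
  simp only [PySem.List.sorted2, PySem.List.sorted, if_neg (by decide : ¬ (false = true))]
  rw [h]

lemma pv_perm_flatMap_filter {α β : Type} [DecidableEq β] (f : α → β) :
    ∀ (D : List β) (K : List α), D.Nodup → (∀ k ∈ K, f k ∈ D) →
      (D.flatMap (fun v => K.filter (fun k => f k == v))).Perm K := by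
  intro D
  induction D with
  | nil =>
    intro K _ hK
    cases K with
    | nil => simp
    | cons a t => exact absurd (hK a (by simp)) (by simp)
  | cons v D' ih =>
    intro K hnd hK
    simp only [List.flatMap_cons]
    have hvD' : v ∉ D' := (List.nodup_cons.mp hnd).1
    have hsub : ∀ v' ∈ D', (K.filter (fun k => f k == v'))
        = ((K.filter (fun k => !(f k == v))).filter (fun k => f k == v')) := by
      intro v' hv'
      rw [List.filter_filter]
      apply List.filter_congr
      intro k hk
      have hne : v' ≠ v := fun h => hvD' (h ▸ hv')
      by_cases he : f k = v' <;> simp [he, hne]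
    have hflat : D'.flatMap (fun v' => K.filter (fun k => f k == v'))
        = D'.flatMap (fun v' => (K.filter (fun k => !(f k == v))).filter (fun k => f k == v')) := by
      simp only [List.flatMap]
      rw [List.map_congr_left hsub]
    rw [hflat]
    have hperm := ih (K.filter (fun k => !(f k == v))) (List.nodup_cons.mp hnd).2 ?_
    · exact ((hperm.append_left (K.filter (fun k => f k == v))).trans (List.filter_append_perm _ K))
    · intro k hk
      have hk1 : k ∈ K := (List.mem_filter.mp hk).1
      have hk2 : f k ≠ v := by simpa using (List.mem_filter.mp hk).2
      rcases List.mem_cons.mp (hK k hk1) with h | h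
      · exact absurd h hk2
      · exact h

lemma pv_flatMap_perm_congr {α β : Type} (D : List β) (f g : β → List α)
    (h : ∀ v ∈ D, (f v).Perm (g v)) : (D.flatMap f).Perm (D.flatMap g) := by
  induction D with
  | nil => simp
  | cons v D' ih =>
    simp only [List.flatMap_cons]
    exact (h v (by simp)).append (ih (fun w hw => h w (by simp [hw])))

lemma pv_main (L : List Char) :
    (PySem.List.sorted (PySem.Set.ofList ((PySem.Set.ofList L).map (fun k => (L.count k : Int))))
        (fun x => x) true).flatMap
      (fun v => PySem.List.sorted
        ((PySem.Set.ofList L).filter (fun k => (L.count k : Int) == v)) (fun x => x) false)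
    = PySem.List.sorted2 (PySem.Set.ofList L) (fun c => -((L.count c : Int))) (fun c => c) false := by
  rw [pv_sorted2_eq_sorted_lex]
  set K : List Char := PySem.Set.ofList L with hKdef
  set cnt : Char → Int := fun k => (L.count k : Int) with hcnt
  set key : List Int := PySem.List.sorted (PySem.Set.ofList (K.map cnt)) (fun x => x) true with hkey
  have hKnd : K.Nodup := PySem.Set.nodup_ofList L
  have hkeyperm : key.Perm (PySem.Set.ofList (K.map cnt)) := PySem.List.sorted_perm _ _ _
  have hkeynd : key.Nodup := hkeyperm.nodup_iff.mpr (PySem.Set.nodup_ofList _)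
  have hkeymem : ∀ k ∈ K, cnt k ∈ key := by
    intro k hk
    rw [PySem.List.mem_sorted, PySem.Set.mem_ofList]
    exact List.mem_map_of_mem hk
  -- key is strictly descending
  have hkeydesc : key.Pairwise (fun a b => b < a) := by
    have h1 : key.Pairwise (fun a b : Int => b ≤ a) := PySem.List.sorted_pairwise_rev _ _
    have h2 : key.Pairwise (fun a b : Int => a ≠ b) := hkeynd
    exact (h1.and h2).imp (fun h => lt_of_le_of_ne h.1 (Ne.symm h.2))
  -- membership in a block fixes the count
  have hblock : ∀ v : Int, ∀ x ∈ PySem.List.sorted (K.filter (fun k => cnt k == v)) (fun x => x) false,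
      x ∈ K ∧ cnt x = v := by
    intro v x hx
    rw [PySem.List.mem_sorted, List.mem_filter] at hx
    exact ⟨hx.1, by simpa using hx.2⟩
  symm
  apply PySem.List.sorted_eq_of_perm_of_pairwise_lt
  · -- permutation
    have h1 : (key.flatMap (fun v => PySem.List.sorted (K.filter (fun k => cnt k == v)) (fun x => x) false)).Perm
        (key.flatMap (fun v => K.filter (fun k => cnt k == v))) :=
      pv_flatMap_perm_congr _ _ _ (fun v _ => PySem.List.sorted_perm _ _ _)
    exact h1.trans (pv_perm_flatMap_filter cnt key K hkeynd hkeymem)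
  · -- pairwise strict lex
    rw [List.flatMap, List.pairwise_flatten]
    constructor
    · intro l hl
      rcases List.mem_map.mp hl with ⟨v, hv, rfl⟩
      have hnd : (PySem.List.sorted (K.filter (fun k => cnt k == v)) (fun x => x) false).Nodup :=
        (PySem.List.sorted_perm _ _ _).nodup_iff.mpr (hKnd.filter _)
      have hle : (PySem.List.sorted (K.filter (fun k => cnt k == v)) (fun x => x) false).Pairwise
          (fun a b : Char => a ≤ b) := PySem.List.sorted_pairwise _ _
      refine ((hle.and hnd).imp_of_mem ?_)
      intro a b ha hb hab
      have hca := (hblock v a ha).2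
      have hcb := (hblock v b hb).2
      rw [Prod.Lex.toLex_lt_toLex]
      right
      refine ⟨?_, lt_of_le_of_ne hab.1 hab.2⟩
      show -(cnt a) = -(cnt b)
      rw [hca, hcb]
    · rw [List.pairwise_map]
      refine hkeydesc.imp_of_mem ?_
      intro v w hv hw hwv x hx y hy
      have hcx := (hblock v x hx).2
      have hcy := (hblock w y hy).2
      rw [Prod.Lex.toLex_lt_toLex]
      left
      show -(cnt x) < -(cnt y)
      rw [hcx, hcy]
      omega

-- A-side tail: from counter L to the flatMap form
lemma pv_A_tail (L : List Char) :
    (let counts : PySem.Dict Char Int := PySem.Dict.counter L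
     let newCounts : PySem.Dict Int (List Char) :=
       counts.items.foldl (fun d kv =>
         if d.contains kv.2 then d.modify kv.2 [] (· ++ [kv.1]) else d.insert kv.2 [kv.1])
         PySem.Dict.empty
     let newCounts2 : PySem.Dict Int (List Char) :=
       newCounts.items.foldl (fun d kv => d.insert kv.1 (PySem.List.sorted kv.2 (fun x => x) false))
         PySem.Dict.empty
     let key : List Int := PySem.List.sorted (PySem.Set.ofList counts.values) (fun x => x) true
     let newCounts3 : PySem.Dict Int (List Char) :=
       key.foldl (fun d k => d.insert k (newCounts2.getD k [])) PySem.Dict.empty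
     newCounts3.items.foldl (fun acc kv => acc ++ kv.2) [])
    = (PySem.List.sorted (PySem.Set.ofList ((PySem.Set.ofList L).map (fun k => (L.count k : Int))))
        (fun x => x) true).flatMap
      (fun v => PySem.List.sorted
        ((PySem.Set.ofList L).filter (fun k => (L.count k : Int) == v)) (fun x => x) false) := by
  simp only []
  set K : List Char := PySem.Set.ofList L with hK
  set cnt : Char → Int := fun k => (L.count k : Int) with hcnt
  have hKnd : K.Nodup := PySem.Set.nodup_ofList L
  -- items of counter
  have hitems : (PySem.Dict.counter L).items = K.map (fun k => (k, cnt k)) :=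
    PySem.Dict.items_counter L
  -- values
  have hvals : (PySem.Dict.counter L).values = K.map cnt := by
    simp only [PySem.Dict.values, hitems, List.map_map]; rfl
  rw [hitems, hvals]
  -- newCounts: collapse the branch into modify, then move to the swapped list
  have hstep : (fun (d : PySem.Dict Int (List Char)) (kv : Char × Int) =>
      if d.contains kv.2 then d.modify kv.2 [] (· ++ [kv.1]) else d.insert kv.2 [kv.1])
      = (fun d kv => d.modify kv.2 [] (· ++ [kv.1])) := by
    funext d kv
    by_cases hc : d.contains kv.2 = true <;>
      simp [hc, PySem.Dict.modify, PySem.Dict.getD_of_not_contains]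
  rw [hstep]
  have hfold : (K.map (fun k => (k, cnt k))).foldl
        (fun (d : PySem.Dict Int (List Char)) kv => d.modify kv.2 [] (· ++ [kv.1])) PySem.Dict.empty
      = (K.map (fun k => (cnt k, k))).foldl
        (fun (d : PySem.Dict Int (List Char)) p => d.modify p.1 [] (· ++ [p.2])) PySem.Dict.empty := by
    rw [List.foldl_map, List.foldl_map]
  rw [hfold]
  set NC : PySem.Dict Int (List Char) := (K.map (fun k => (cnt k, k))).foldl
        (fun (d : PySem.Dict Int (List Char)) p => d.modify p.1 [] (· ++ [p.2])) PySem.Dict.empty with hNC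
  have hNCgetD : ∀ v : Int, NC.getD v [] = K.filter (fun k => cnt k == v) := by
    intro v
    rw [hNC, PySem.Dict.getD_foldl_modify_append]
    simp only [PySem.Dict.getD_empty, List.filter_map, List.map_map]
    simp [Function.comp_def]
  have hNCkeys : NC.keys = PySem.Set.ofList (K.map cnt) := by
    rw [hNC]
    rw [PySem.Dict.keys_foldl_modify_key (K.map (fun k => (cnt k, k))) Prod.fst []
      (fun d p => (· ++ [p.2]))]
    simp only [List.map_map, Function.comp_def]
    rfl
  have hNCnd : NC.keys.Nodup := by
    rw [hNC]
    exact PySem.Dict.nodup_keys_foldl_modify_key _ Prod.fst [] (fun d p => (· ++ [p.2])) _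
      (by simp [PySem.Dict.keys_empty])
  -- newCounts2
  have hNC2items : ((NC.items.foldl (fun d kv => d.insert kv.1 (PySem.List.sorted kv.2 (fun x => x) false))
      (PySem.Dict.empty : PySem.Dict Int (List Char)))).items
      = NC.items.map (fun kv => (kv.1, PySem.List.sorted kv.2 (fun x => x) false)) := by
    rw [PySem.Dict.items_foldl_insert_fresh NC.items Prod.fst
      (fun kv => PySem.List.sorted kv.2 (fun x => x) false) PySem.Dict.empty
      (fun a _ => PySem.Dict.contains_empty _) hNCnd]
    simp [PySem.Dict.empty]
  set NC2 : PySem.Dict Int (List Char) := NC.items.foldl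
      (fun d kv => d.insert kv.1 (PySem.List.sorted kv.2 (fun x => x) false)) PySem.Dict.empty with hNC2
  have hNC2nd : NC2.keys.Nodup := by
    simp only [PySem.Dict.keys, hNC2items, List.map_map]
    simpa [Function.comp_def, PySem.Dict.keys] using hNCnd
  have hNC2getD : ∀ v ∈ NC.keys, NC2.getD v [] = PySem.List.sorted (K.filter (fun k => cnt k == v)) (fun x => x) false := by
    intro v hv
    have hc : NC.contains v = true := (PySem.Dict.contains_iff_mem_keys _ _).mpr hv
    rcases Option.isSome_iff_exists.mp (show (NC.get? v).isSome = true by rw [← PySem.Dict.contains_eq_isSome_get?]; exact hc) with ⟨w, hw⟩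
    have hwv : w = K.filter (fun k => cnt k == v) := by
      rw [← PySem.Dict.getD_of_get?_eq_some NC ([] : List Char) hw, hNCgetD v]
    have hmem : (v, K.filter (fun k => cnt k == v)) ∈ NC.items := by
      rw [← hwv]
      exact PySem.Dict.mem_items_of_get?_eq_some NC hw
    have hmem2 : (v, PySem.List.sorted (K.filter (fun k => cnt k == v)) (fun x => x) false) ∈ NC2.items := by
      rw [hNC2items]
      exact List.mem_map.mpr ⟨_, hmem, rfl⟩
    exact PySem.Dict.getD_of_mem_items _ hmem2 hNC2nd _
  -- key list
  set key : List Int := PySem.List.sorted (PySem.Set.ofList (K.map cnt)) (fun x => x) true with hkey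
  have hkeynd : key.Nodup := (PySem.List.sorted_perm _ _ _).nodup_iff.mpr (PySem.Set.nodup_ofList _)
  -- newCounts3
  have hNC3items : ((key.foldl (fun d k => d.insert k (NC2.getD k [])) (PySem.Dict.empty : PySem.Dict Int (List Char)))).items
      = key.map (fun v => (v, NC2.getD v [])) := by
    rw [PySem.Dict.items_foldl_insert_fresh key (fun v => v) (fun v => NC2.getD v []) PySem.Dict.empty
      (fun a _ => PySem.Dict.contains_empty _) (by simpa using hkeynd)]
    simp [PySem.Dict.empty]
  rw [hNC3items]
  rw [PySem.List.foldl_append_eq_flatMap]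
  simp only [List.nil_append, List.flatMap_map]
  apply List.flatMap_congr
  intro v hv
  apply hNC2getD
  rw [hNCkeys]
  exact (PySem.List.mem_sorted _ _ _ _).mp hv

-- ===== VERDICT (by name: the statement is the Claim_ definition above) =====
theorem is_a_room_spec : Claim_equal_is_a_room := by
  intro left right _
  unfold Spec_is_a_room
  show is_a_room left right = is_a_room_alt left right
  unfold is_a_room is_a_room_alt
  simp only [pv_countsA, pv_countsB]
  rw [pv_A_tail (left.toList.filter (fun c => pyAsciiLetters.contains c))]
  rw [PySem.Dict.keys_counter]
  have hfun : (fun c => -((PySem.Dict.counter (left.toList.filter (fun c => pyAsciiLetters.contains c))).getD c 0))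
      = (fun c => -(((left.toList.filter (fun c => pyAsciiLetters.contains c)).count c : Int))) := by
    funext c
    rw [PySem.Dict.getD_counter]
  rw [hfun, pv_main]
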